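-- pv_equiv track=rewrite | github.com/CodingJudo/lokalizebypass | src/select.py | batch_by_namespace
-- ===== SOURCE A (Python) =====
-- from typing import List, Dict, Any
-- from collections import defaultdict
--
-- def batch_by_namespace(
--     items: List[Dict[str, Any]],
--     batch_size: int = 10
-- ) -> List[List[Dict[str, Any]]]:
--     """
--     Batch items by namespace with stable ordering.
--
--     Groups items by namespace (extracted from key prefix before first dot),
--     then batches within each namespace. Maintains stable ordering.
--
--     Args:
--         items: List of items to batch, each with "key" field
--         batch_size: Maximum items per batch (default: 10)
--
--     Returns:
--         List of batches, each batch is a list of items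
--     """
--     # Group by namespace
--     by_namespace = defaultdict(list)
--
--     for item in items:
--         key = item["key"]
--         if "." in key:
--             namespace = key.split(".", 1)[0]
--         else:
--             namespace = "default"
--
--         by_namespace[namespace].append(item)
--
--     # Create batches within each namespace
--     batches = []
--
--     # Sort namespaces for deterministic ordering
--     for namespace in sorted(by_namespace.keys()):
--         namespace_items = by_namespace[namespace]
--
--         # Sort items by key for stable ordering
--         namespace_items.sort(key=lambda x: x["key"])
--
--         # Batch items
--         for i in range(0, len(namespace_items), batch_size):
--             batch = namespace_items[i:i + batch_size]
--             batches.append(batch)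
--
--     return batches
-- ===== SOURCE B (Python) =====
-- from itertools import groupby
-- from typing import List, Dict, Any
--
--
-- def batch_by_namespace(
--     items: List[Dict[str, Any]],
--     batch_size: int = 10
-- ) -> List[List[Dict[str, Any]]]:
--     """Sort once by (namespace, key), then split into namespace runs and chunk each run."""
--     def namespace_of(item):
--         key = item["key"]
--         return key.split(".", 1)[0] if "." in key else "default"
--
--     ordered = sorted(items, key=lambda it: (namespace_of(it), it["key"]))
--     batches = []
--     for _, run in groupby(ordered, key=namespace_of):
--         group = list(run)
--         batches.extend(group[i:i + batch_size] for i in range(0, len(group), batch_size))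
--     return batches
-- ===== Notes on version B (the rewrite author's own statement) =====
-- stated objective: simpler
-- what changed: A groups items into a defaultdict by namespace, sorts the namespace list and each bucket separately, then slices each bucket; B does one stable sort on the composite key (namespace, key) and recovers the buckets with itertools.groupby before chunking each run.
import Mathlib
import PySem

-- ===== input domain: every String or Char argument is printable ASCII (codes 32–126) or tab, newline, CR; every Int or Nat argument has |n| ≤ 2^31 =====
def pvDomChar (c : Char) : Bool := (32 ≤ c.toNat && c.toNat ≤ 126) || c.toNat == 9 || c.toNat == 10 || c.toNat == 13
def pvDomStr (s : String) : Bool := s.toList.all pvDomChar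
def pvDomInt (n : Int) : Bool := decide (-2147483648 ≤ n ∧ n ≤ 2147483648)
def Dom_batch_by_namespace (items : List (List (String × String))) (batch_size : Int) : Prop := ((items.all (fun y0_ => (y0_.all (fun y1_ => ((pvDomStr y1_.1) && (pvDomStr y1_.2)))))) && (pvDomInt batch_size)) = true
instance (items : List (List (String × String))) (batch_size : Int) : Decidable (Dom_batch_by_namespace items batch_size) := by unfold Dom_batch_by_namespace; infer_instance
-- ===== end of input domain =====

-- B replaces A's group-into-a-dict-then-sort-each-bucket scheme by one stable sort on the
-- composite key (namespace, key) followed by a groupby-style run split and per-run chunking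
-- (objective: simpler decomposition; same asymptotic cost).


-- ===== PORT A =====
-- item["key"]  (a missing "key" would be a KeyError in Python; those inputs are excluded by Pre_)
def pvKeyOf (item : List (String × String)) : String :=
  (PySem.Dict.get? (PySem.Dict.mk item) "key").getD ""

-- namespace = key.split(".", 1)[0] if "." in key else "default"
def pvNsOf (item : List (String × String)) : String :=
  let key := pvKeyOf item
  if PySem.Str.isIn "." key then ((PySem.Str.splitMax? key "." 1).getD []).headD ""
  else "default"

-- by_namespace = defaultdict(list); append each item; then for each sorted namespace,
-- sort its bucket by key and slice it into batches
def batch_by_namespace (items : List (List (String × String))) (batch_size : Int) : List (List (List (String × String))) :=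
  let by_ns : PySem.Dict String (List (List (String × String))) :=
    items.foldl (fun d item => d.modify (pvNsOf item) [] (fun g => g ++ [item])) PySem.Dict.empty
  (PySem.List.sorted by_ns.keys (fun n => n) false).foldl
    (fun batches n =>
      let g := PySem.List.sorted (by_ns.getD n []) pvKeyOf false
      (PySem.List.pyRange 0 (g.length : Int) batch_size).foldl
        (fun bt i => bt ++ [PySem.List.slice g (some i) (some (i + batch_size))]) batches)
    []

-- ===== PORT B =====
-- itertools.groupby(ordered, key=namespace_of): maximal runs of equal namespace
def pvGroupRuns (f : List (String × String) → String) : List (List (String × String)) → List (List (List (String × String)))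
  | [] => []
  | x :: xs =>
      (x :: xs.takeWhile (fun y => f y == f x)) :: pvGroupRuns f (xs.dropWhile (fun y => f y == f x))
  termination_by l => l.length
  decreasing_by simp only [List.length_cons]; exact Nat.lt_succ_of_le (List.length_dropWhile_le _ xs)

-- group[i:i+batch_size] for i in range(0, len(group), batch_size)
def pvChunks (g : List (List (String × String))) (batch_size : Int) : List (List (List (String × String))) :=
  (PySem.List.pyRange 0 (g.length : Int) batch_size).map
    (fun i => PySem.List.slice g (some i) (some (i + batch_size)))

def batch_by_namespace_alt (items : List (List (String × String))) (batch_size : Int) : List (List (List (String × String))) :=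
  let ordered := PySem.List.sorted2 items pvNsOf pvKeyOf false
  (pvGroupRuns pvNsOf ordered).foldl (fun acc g => acc ++ pvChunks g batch_size) []

-- ===== PRECONDITION & SPEC =====
-- Pre_ excludes exactly the inputs where the Python A raises: an item without a "key" field
-- (KeyError) and batch_size = 0 with a nonempty item list (ValueError from range step 0).
def Pre_batch_by_namespace (items : List (List (String × String))) (batch_size : Int) : Prop :=
  (∀ item ∈ items, (PySem.Dict.mk item).contains "key" = true) ∧ (items = [] ∨ batch_size ≠ 0)
instance (items : List (List (String × String))) (batch_size : Int) : Decidable (Pre_batch_by_namespace items batch_size) := by unfold Pre_batch_by_namespace; infer_instance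

def pvWitness_batch_by_namespace : (List (List (String × String))) × Int :=
  ([[("key", "app.title"), ("v", "1")], [("key", "plain")], [("key", "app.msg")]], 2)

def Spec_batch_by_namespace (items : List (List (String × String))) (batch_size : Int) (out : List (List (List (String × String)))) : Prop := out = batch_by_namespace_alt items batch_size
instance (items : List (List (String × String))) (batch_size : Int) (out : List (List (List (String × String)))) : Decidable (Spec_batch_by_namespace items batch_size out) := by unfold Spec_batch_by_namespace; infer_instance

-- ===== CLAIM (what is proved, stated in full; the proofs are below) =====
def Claim_equal_batch_by_namespace : Prop := ∀ (items : List (List (String × String))) (batch_size : Int), Dom_batch_by_namespace items batch_size → Pre_batch_by_namespace items batch_size → Spec_batch_by_namespace items batch_size (batch_by_namespace items batch_size)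

-- ===== LEMMAS AND PROOFS =====
-- the two insertion orders used by the stable sorts (by key within a bucket; composite),
-- and pvBlocks: the common intermediate picture — namespaces in strictly increasing order,
-- each paired with its key-sorted bucket, built by inserting one item at a time
def pvBf1 (x y : List (String × String)) : Bool := decide (pvKeyOf x < pvKeyOf y)
def pvBf2 (x y : List (String × String)) : Bool :=
  decide (pvNsOf x < pvNsOf y) || (!decide (pvNsOf y < pvNsOf x) && decide (pvKeyOf x < pvKeyOf y))

def pvInsB (x : List (String × String)) : List (String × List (List (String × String))) → List (String × List (List (String × String)))
  | [] => [(pvNsOf x, [x])]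
  | (n, g) :: bs =>
      if pvNsOf x < n then (pvNsOf x, [x]) :: (n, g) :: bs
      else if pvNsOf x = n then (n, PySem.List.insertBy pvBf1 x g) :: bs
      else (n, g) :: pvInsB x bs

def pvBlocks (items : List (List (String × String))) : List (String × List (List (String × String))) :=
  items.foldl (fun bs x => pvInsB x bs) []

def pvInv (bs : List (String × List (List (String × String)))) : Prop :=
  (bs.map Prod.fst).Pairwise (· < ·) ∧ ∀ p ∈ bs, p.2 ≠ [] ∧ ∀ y ∈ p.2, pvNsOf y = p.1

def pvBget (bs : List (String × List (List (String × String)))) (n : String) : List (List (String × String)) :=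
  ((bs.find? (fun p => p.1 == n)).map Prod.snd).getD []

theorem pv_insertBy_append_skip {α : Type} (b : α → α → Bool) (x : α) (g rest : List α)
    (h : ∀ y ∈ g, b x y = false) :
    PySem.List.insertBy b x (g ++ rest) = g ++ PySem.List.insertBy b x rest := by
  induction g with
  | nil => simp
  | cons y g ih =>
    simp only [List.cons_append, PySem.List.insertBy, h y (List.mem_cons_self),
      ih (fun z hz => h z (List.mem_cons_of_mem _ hz))]
    simp

theorem pv_insertBy_localize {α : Type} (b1 b2 : α → α → Bool) (x : α) (g rest : List α)
    (hg : ∀ y ∈ g, b2 x y = b1 x y) (hrest : ∀ z ∈ rest.head?, b2 x z = true) :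
    PySem.List.insertBy b2 x (g ++ rest) = PySem.List.insertBy b1 x g ++ rest := by
  induction g with
  | nil =>
    cases rest with
    | nil => simp [PySem.List.insertBy]
    | cons z t =>
      simp only [List.nil_append, PySem.List.insertBy, hrest z (by simp)]
      simp
  | cons y g ih =>
    have hy := hg y (List.mem_cons_self)
    simp only [List.cons_append, PySem.List.insertBy, hy]
    cases hb : b1 x y with
    | true => simp
    | false => simp [ih (fun z hz => hg z (List.mem_cons_of_mem _ hz))]

theorem pv_mem_fst_insB (x : List (String × String)) (bs : List (String × List (List (String × String)))) (a : String)
    (h : a ∈ (pvInsB x bs).map Prod.fst) : a = pvNsOf x ∨ a ∈ bs.map Prod.fst := by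
  induction bs with
  | nil =>
    simp only [pvInsB, List.map_cons, List.map_nil, List.mem_cons, List.not_mem_nil, or_false] at h
    exact Or.inl h
  | cons p bs ih =>
    obtain ⟨n, g⟩ := p
    simp only [pvInsB] at h
    split_ifs at h with h1 h2 <;>
      simp only [List.map_cons, List.mem_cons] at h ⊢
    · rcases h with rfl | h; exact Or.inl rfl; exact Or.inr h
    · rcases h with rfl | h
      · exact Or.inr (Or.inl rfl)
      · exact Or.inr (Or.inr h)
    · rcases h with rfl | h
      · exact Or.inr (Or.inl rfl)
      · rcases ih h with h' | h'
        · exact Or.inl h'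
        · exact Or.inr (Or.inr h')

theorem pv_inv_insB (x : List (String × String)) (bs : List (String × List (List (String × String))))
    (h : pvInv bs) : pvInv (pvInsB x bs) := by
  induction bs with
  | nil =>
    refine ⟨by simp [pvInsB], ?_⟩
    intro p hp; simp [pvInsB] at hp; subst hp; simp
  | cons p bs ih =>
    obtain ⟨n, g⟩ := p
    obtain ⟨hpw, hblk⟩ := h
    simp only [List.map_cons, List.pairwise_cons] at hpw
    have hblk_head := hblk (n, g) (List.mem_cons_self)
    have hblk_tail : ∀ q ∈ bs, q.2 ≠ [] ∧ ∀ y ∈ q.2, pvNsOf y = q.1 :=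
      fun q hq => hblk q (List.mem_cons_of_mem _ hq)
    have ihv := ih ⟨hpw.2, hblk_tail⟩
    simp only [pvInsB]
    split_ifs with h1 h2
    · refine ⟨?_, ?_⟩
      · simp only [List.map_cons, List.pairwise_cons]
        refine ⟨?_, ⟨hpw.1, hpw.2⟩⟩
        intro a ha
        simp only [List.map_cons, List.mem_cons] at ha
        rcases ha with rfl | ha
        · exact h1
        · exact lt_trans h1 (hpw.1 a ha)
      · intro q hq
        rcases List.mem_cons.mp hq with rfl | hq
        · simp
        · exact hblk q hq
    · subst h2
      refine ⟨by simpa using hpw, ?_⟩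
      intro q hq
      rcases List.mem_cons.mp hq with rfl | hq
      · constructor
        · intro hnil
          have hlen := (PySem.List.insertBy_perm pvBf1 x g).length_eq
          rw [show (pvNsOf x, PySem.List.insertBy pvBf1 x g).2 = PySem.List.insertBy pvBf1 x g from rfl] at hnil
          rw [hnil] at hlen
          simp at hlen
        · intro y hy
          rcases (PySem.List.mem_insertBy _ _ _ _).mp hy with rfl | hy
          · rfl
          · exact hblk_head.2 y hy
      · exact hblk_tail q hq
    · have hlt : n < pvNsOf x := by
        rcases lt_trichotomy (pvNsOf x) n with h' | h' | h' <;> tauto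
      refine ⟨?_, ?_⟩
      · simp only [List.map_cons, List.pairwise_cons]
        refine ⟨?_, ihv.1⟩
        intro a ha
        rcases pv_mem_fst_insB x bs a ha with rfl | ha
        · exact hlt
        · exact hpw.1 a ha
      · intro q hq
        rcases List.mem_cons.mp hq with rfl | hq
        · exact hblk_head
        · exact ihv.2 q hq
theorem pv_bget_eq_nil_of_not_mem (bs : List (String × List (List (String × String)))) (n : String)
    (h : n ∉ bs.map Prod.fst) : pvBget bs n = [] := by
  induction bs with
  | nil => rfl
  | cons p bs ih =>
    obtain ⟨m, g⟩ := p
    simp only [List.map_cons, List.mem_cons, not_or] at h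
    have hm : (m == n) = false := by simp [Ne.symm h.1]
    simp only [pvBget, List.find?_cons, hm]
    exact ih h.2

theorem pv_bget_insB (x : List (String × String)) (bs : List (String × List (List (String × String)))) (n : String)
    (h : (bs.map Prod.fst).Pairwise (· < ·)) :
    pvBget (pvInsB x bs) n =
      if n = pvNsOf x then PySem.List.insertBy pvBf1 x (pvBget bs n) else pvBget bs n := by
  induction bs with
  | nil =>
    by_cases hn : n = pvNsOf x
    · subst hn
      simp [pvInsB, pvBget, PySem.List.insertBy]
    · have : (pvNsOf x == n) = false := by simp [Ne.symm hn]
      simp [pvInsB, pvBget, this, hn]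
  | cons p bs ih =>
    obtain ⟨m, g⟩ := p
    simp only [List.map_cons, List.pairwise_cons] at h
    by_cases hn : n = pvNsOf x
    · subst hn
      simp only [if_pos rfl]
      simp only [pvInsB]
      split_ifs with h1 h2
      · have hnotmem : pvNsOf x ∉ ((m, g) :: bs).map Prod.fst := by
          simp only [List.map_cons, List.mem_cons, not_or]
          refine ⟨fun e => absurd (e ▸ h1) (lt_irrefl _), fun hm => ?_⟩
          exact absurd (lt_trans h1 (h.1 _ hm)) (lt_irrefl _)
        rw [pv_bget_eq_nil_of_not_mem _ _ hnotmem]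
        simp [pvBget, List.find?_cons, PySem.List.insertBy]
      · subst h2
        simp [pvBget, List.find?_cons]
      · have hm : (m == pvNsOf x) = false := by
          simp only [beq_eq_false_iff_ne, ne_eq]
          exact fun e => h2 e.symm
        simp only [pvBget, List.find?_cons, hm]
        have := ih h.2
        rw [if_pos rfl] at this
        exact this
    · simp only [if_neg hn]
      have hxe : (pvNsOf x == n) = false := by simp [Ne.symm hn]
      simp only [pvInsB]
      split_ifs with h1 h2
      · simp [pvBget, List.find?_cons, hxe]
      · subst h2
        simp [pvBget, List.find?_cons, hxe]
      · by_cases hm : m = n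
        · subst hm
          simp [pvBget, List.find?_cons]
        · have hm' : (m == n) = false := by simp [hm]
          simp only [pvBget, List.find?_cons, hm']
          have := ih h.2
          rw [if_neg hn] at this
          exact this

theorem pv_bget_self (bs : List (String × List (List (String × String)))) (p : String × List (List (String × String)))
    (h : (bs.map Prod.fst).Pairwise (· < ·)) (hp : p ∈ bs) : pvBget bs p.1 = p.2 := by
  induction bs with
  | nil => cases hp
  | cons q bs ih =>
    obtain ⟨m, g⟩ := q
    simp only [List.map_cons, List.pairwise_cons] at h
    rcases List.mem_cons.mp hp with rfl | hp
    · simp [pvBget, List.find?_cons]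
    · have hmem : p.1 ∈ bs.map Prod.fst := List.mem_map_of_mem hp
      have hne : (m == p.1) = false := by
        simp only [beq_eq_false_iff_ne, ne_eq]
        exact fun e => absurd (e ▸ h.1 p.1 hmem) (lt_irrefl _)
      simp only [pvBget, List.find?_cons, hne]
      exact ih h.2 hp
theorem pv_flatten_insB (x : List (String × String)) (bs : List (String × List (List (String × String))))
    (h : pvInv bs) :
    PySem.List.insertBy pvBf2 x ((bs.map Prod.snd).flatten) = ((pvInsB x bs).map Prod.snd).flatten := by
  induction bs with
  | nil => simp [pvInsB, PySem.List.insertBy]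
  | cons p bs ih =>
    obtain ⟨n, g⟩ := p
    obtain ⟨hpw, hblk⟩ := h
    simp only [List.map_cons, List.pairwise_cons] at hpw
    have hhead := hblk (n, g) (List.mem_cons_self)
    have htails : ∀ q ∈ bs, q.2 ≠ [] ∧ ∀ y ∈ q.2, pvNsOf y = q.1 :=
      fun q hq => hblk q (List.mem_cons_of_mem _ hq)
    have htailns : ∀ z ∈ (bs.map Prod.snd).flatten, n < pvNsOf z := by
      intro z hz
      obtain ⟨l, hl, hzl⟩ := List.mem_flatten.mp hz
      obtain ⟨q, hq, rfl⟩ := List.mem_map.mp hl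
      rw [(htails q hq).2 z hzl]
      exact hpw.1 _ (List.mem_map_of_mem hq)
    simp only [pvInsB]
    split_ifs with h1 h2
    · -- x goes in front of everything
      obtain ⟨y, g', rfl⟩ : ∃ y g', g = y :: g' := by
        cases g with
        | nil => exact absurd rfl hhead.1
        | cons y g' => exact ⟨y, g', rfl⟩
      have hby : pvBf2 x y = true := by
        have : pvNsOf y = n := hhead.2 y (List.mem_cons_self)
        simp [pvBf2, this, h1]
      simp only [List.map_cons, List.flatten_cons, List.cons_append,
        PySem.List.insertBy, hby]
      simp
    · -- merge into the head bucket
      subst h2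
      simp only [List.map_cons, List.flatten_cons]
      rw [pv_insertBy_localize pvBf1 pvBf2 x g ((bs.map Prod.snd).flatten)
        (fun y hy => by simp [pvBf1, pvBf2, hhead.2 y hy])
        (fun z hz => by
          have hzmem : z ∈ (bs.map Prod.snd).flatten := by
            cases hflat : (bs.map Prod.snd).flatten with
            | nil => rw [hflat] at hz; cases hz
            | cons a t => rw [hflat] at hz; simp at hz; rw [hz]; exact List.mem_cons_self
          simp [pvBf2, htailns z hzmem])]
    · -- skip the head bucket entirely
      have hlt : n < pvNsOf x := by
        rcases lt_trichotomy (pvNsOf x) n with h' | h' | h' <;> tauto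
      simp only [List.map_cons, List.flatten_cons]
      rw [pv_insertBy_append_skip pvBf2 x g _
        (fun y hy => by simp [pvBf2, hhead.2 y hy, hlt, not_lt_of_gt hlt])]
      rw [ih ⟨hpw.2, htails⟩]
theorem pv_takeWhile_all {α : Type} (p : α → Bool) (g rest : List α) (h : ∀ y ∈ g, p y = true) :
    (g ++ rest).takeWhile p = g ++ rest.takeWhile p := by
  induction g with
  | nil => rfl
  | cons y g ih =>
    simp only [List.cons_append, List.takeWhile_cons, h y List.mem_cons_self,
      ih (fun z hz => h z (List.mem_cons_of_mem _ hz))]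
    simp

theorem pv_dropWhile_all {α : Type} (p : α → Bool) (g rest : List α) (h : ∀ y ∈ g, p y = true) :
    (g ++ rest).dropWhile p = rest.dropWhile p := by
  induction g with
  | nil => rfl
  | cons y g ih =>
    simp only [List.cons_append, List.dropWhile_cons, h y List.mem_cons_self,
      ih (fun z hz => h z (List.mem_cons_of_mem _ hz))]
    simp

theorem pv_takeWhile_head_false {α : Type} (p : α → Bool) (l : List α)
    (h : ∀ z ∈ l.head?, p z = false) : l.takeWhile p = [] := by
  cases l with
  | nil => rfl
  | cons z t => simp [List.takeWhile_cons, h z (by simp)]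

theorem pv_dropWhile_head_false {α : Type} (p : α → Bool) (l : List α)
    (h : ∀ z ∈ l.head?, p z = false) : l.dropWhile p = l := by
  cases l with
  | nil => rfl
  | cons z t => simp [List.dropWhile_cons, h z (by simp)]

theorem pv_groupRuns_flatten (bs : List (String × List (List (String × String)))) (h : pvInv bs) :
    pvGroupRuns pvNsOf ((bs.map Prod.snd).flatten) = bs.map Prod.snd := by
  induction bs with
  | nil => simp [pvGroupRuns]
  | cons p bs ih =>
    obtain ⟨n, g⟩ := p
    obtain ⟨hpw, hblk⟩ := h
    simp only [List.map_cons, List.pairwise_cons] at hpw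
    have hhead := hblk (n, g) (List.mem_cons_self)
    have htails : ∀ q ∈ bs, q.2 ≠ [] ∧ ∀ y ∈ q.2, pvNsOf y = q.1 :=
      fun q hq => hblk q (List.mem_cons_of_mem _ hq)
    have htailns : ∀ z ∈ (bs.map Prod.snd).flatten, n < pvNsOf z := by
      intro z hz
      obtain ⟨l, hl, hzl⟩ := List.mem_flatten.mp hz
      obtain ⟨q, hq, rfl⟩ := List.mem_map.mp hl
      rw [(htails q hq).2 z hzl]
      exact hpw.1 _ (List.mem_map_of_mem hq)
    obtain ⟨y, g', rfl⟩ : ∃ y g', g = y :: g' := by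
      cases g with
      | nil => exact absurd rfl hhead.1
      | cons y g' => exact ⟨y, g', rfl⟩
    have hny : pvNsOf y = n := hhead.2 y List.mem_cons_self
    have hptrue : ∀ z ∈ g', (pvNsOf z == pvNsOf y) = true := by
      intro z hz
      simp [hhead.2 z (List.mem_cons_of_mem _ hz), hny]
    have hpfalse : ∀ z ∈ ((bs.map Prod.snd).flatten).head?, (pvNsOf z == pvNsOf y) = false := by
      intro z hz
      have hzmem : z ∈ (bs.map Prod.snd).flatten := by
        cases hflat : (bs.map Prod.snd).flatten with
        | nil => rw [hflat] at hz; cases hz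
        | cons a t => rw [hflat] at hz; simp at hz; rw [hz]; exact List.mem_cons_self
      have := htailns z hzmem
      simp only [beq_eq_false_iff_ne, ne_eq, hny]
      exact fun e => absurd (e ▸ this) (lt_irrefl _)
    simp only [List.map_cons, List.flatten_cons, List.cons_append, pvGroupRuns]
    rw [pv_takeWhile_all _ g' _ hptrue, pv_takeWhile_head_false _ _ hpfalse,
      pv_dropWhile_all _ g' _ hptrue, pv_dropWhile_head_false _ _ hpfalse]
    rw [ih ⟨hpw.2, htails⟩]
    simp
theorem pv_blocks_snoc (l : List (List (String × String))) (x : List (String × String)) :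
    pvBlocks (l ++ [x]) = pvInsB x (pvBlocks l) := by
  simp [pvBlocks, List.foldl_append]

theorem pv_inv_blocks (items : List (List (String × String))) : pvInv (pvBlocks items) := by
  induction items using List.reverseRecOn with
  | nil => exact ⟨List.Pairwise.nil, by simp [pvBlocks]⟩
  | append_singleton l x ih => rw [pv_blocks_snoc]; exact pv_inv_insB x _ ih

theorem pv_sorted_snoc {α κ : Type} [LinearOrder κ] (l : List α) (x : α) (key : α → κ) :
    PySem.List.sorted (l ++ [x]) key false =
      PySem.List.insertBy (fun a b => decide (key a < key b)) x (PySem.List.sorted l key false) := by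
  rw [PySem.List.sorted_eq_foldl_insertBy, PySem.List.sorted_eq_foldl_insertBy, List.foldl_append]
  rfl

theorem pv_bget_blocks (items : List (List (String × String))) (n : String) :
    pvBget (pvBlocks items) n =
      PySem.List.sorted (items.filter (fun it => pvNsOf it == n)) pvKeyOf false := by
  induction items using List.reverseRecOn with
  | nil => rfl
  | append_singleton l x ih =>
    rw [pv_blocks_snoc, pv_bget_insB x _ n (pv_inv_blocks l).1, List.filter_append]
    by_cases hn : n = pvNsOf x
    · subst hn
      have hfx : List.filter (fun it => pvNsOf it == pvNsOf x) [x] = [x] := by simp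
      rw [if_pos rfl, hfx, pv_sorted_snoc, ih]
      rfl
    · have hb : (pvNsOf x == n) = false := by simp [Ne.symm hn]
      have hfx : List.filter (fun it => pvNsOf it == n) [x] = [] := by simp [hb]
      rw [if_neg hn, hfx, List.append_nil, ih]

theorem pv_insertBy_cons_of_false {α : Type} (b : α → α → Bool) (x y : α) (ys : List α)
    (h : b x y = false) :
    PySem.List.insertBy b x (y :: ys) = y :: PySem.List.insertBy b x ys := by
  simp only [PySem.List.insertBy, h]
  simp

theorem pv_insertBy_cons_of_true {α : Type} (b : α → α → Bool) (x y : α) (ys : List α)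
    (h : b x y = true) :
    PySem.List.insertBy b x (y :: ys) = x :: y :: ys := by
  simp only [PySem.List.insertBy, h]
  simp

theorem pv_map_fst_insB (x : List (String × String)) (bs : List (String × List (List (String × String))))
    (h : (bs.map Prod.fst).Pairwise (· < ·)) :
    (pvInsB x bs).map Prod.fst =
      if pvNsOf x ∈ bs.map Prod.fst then bs.map Prod.fst
      else PySem.List.insertBy (fun a b => decide (a < b)) (pvNsOf x) (bs.map Prod.fst) := by
  induction bs with
  | nil => simp [pvInsB, PySem.List.insertBy]
  | cons p bs ih =>
    obtain ⟨m, g⟩ := p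
    simp only [List.map_cons, List.pairwise_cons] at h
    simp only [pvInsB]
    by_cases h1 : pvNsOf x < m
    · rw [if_pos h1]
      have hne : pvNsOf x ≠ m := fun e => absurd (e ▸ h1) (lt_irrefl _)
      have hnm : pvNsOf x ∉ List.map Prod.fst bs := fun hm => absurd (lt_trans h1 (h.1 _ hm)) (lt_irrefl _)
      rw [if_neg (by simp only [List.map_cons, List.mem_cons]; tauto)]
      simp only [List.map_cons]
      rw [pv_insertBy_cons_of_true _ _ _ _ (by simp [h1])]
    · rw [if_neg h1]
      by_cases h2 : pvNsOf x = m
      · rw [if_pos h2, if_pos (by simp only [List.map_cons, List.mem_cons]; exact Or.inl h2)]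
        simp [h2]
      · rw [if_neg h2]
        have hlt : m < pvNsOf x := by
          rcases lt_trichotomy (pvNsOf x) m with h' | h' | h' <;> tauto
        simp only [List.map_cons, ih h.2]
        by_cases hmem : pvNsOf x ∈ List.map Prod.fst bs
        · rw [if_pos hmem, if_pos (by simp only [List.mem_cons]; exact Or.inr hmem)]
        · rw [if_neg hmem, if_neg (by simp only [List.mem_cons]; tauto)]
          rw [pv_insertBy_cons_of_false _ _ _ _ (by simp [not_lt_of_gt hlt])]

theorem pv_fsts_blocks (items : List (List (String × String))) :
    (pvBlocks items).map Prod.fst =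
      PySem.List.sorted (PySem.Set.ofList (items.map pvNsOf)) (fun z => z) false := by
  induction items using List.reverseRecOn with
  | nil => rfl
  | append_singleton l x ih =>
    rw [pv_blocks_snoc, pv_map_fst_insB x _ (pv_inv_blocks l).1]
    have hofl : PySem.Set.ofList ((l ++ [x]).map pvNsOf) =
        PySem.Set.add (PySem.Set.ofList (l.map pvNsOf)) (pvNsOf x) := by
      rw [List.map_append, PySem.Set.ofList_eq_foldl, PySem.Set.ofList_eq_foldl, List.foldl_append]
      rfl
    rw [hofl]
    by_cases hmem : pvNsOf x ∈ (pvBlocks l).map Prod.fst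
    · have hm2 : pvNsOf x ∈ PySem.Set.ofList (l.map pvNsOf) := by
        have h' := hmem
        rw [ih, PySem.List.mem_sorted] at h'
        exact h'
      have hc : PySem.Set.contains (PySem.Set.ofList (l.map pvNsOf)) (pvNsOf x) = true :=
        (PySem.Set.contains_iff _ _).mpr hm2
      have hadd : PySem.Set.add (PySem.Set.ofList (l.map pvNsOf)) (pvNsOf x) =
          PySem.Set.ofList (l.map pvNsOf) := by
        simp only [PySem.Set.add, hc]
        simp
      rw [if_pos hmem, hadd, ih]
    · have hm2 : pvNsOf x ∉ PySem.Set.ofList (l.map pvNsOf) := by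
        intro h'
        rw [ih] at hmem
        exact hmem ((PySem.List.mem_sorted _ _ _ _).mpr h')
      have hc : PySem.Set.contains (PySem.Set.ofList (l.map pvNsOf)) (pvNsOf x) = false := by
        rw [Bool.eq_false_iff]
        exact fun hc' => hm2 ((PySem.Set.contains_iff _ _).mp hc')
      have hadd : PySem.Set.add (PySem.Set.ofList (l.map pvNsOf)) (pvNsOf x) =
          PySem.Set.ofList (l.map pvNsOf) ++ [pvNsOf x] := by
        simp only [PySem.Set.add, hc]
        simp
      rw [if_neg hmem, hadd, pv_sorted_snoc, ih]

theorem pv_flatten_blocks (items : List (List (String × String))) :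
    ((pvBlocks items).map Prod.snd).flatten = PySem.List.sorted2 items pvNsOf pvKeyOf false := by
  induction items using List.reverseRecOn with
  | nil => rfl
  | append_singleton l x ih =>
    have hsnoc : PySem.List.sorted2 (l ++ [x]) pvNsOf pvKeyOf false =
        PySem.List.insertBy pvBf2 x (PySem.List.sorted2 l pvNsOf pvKeyOf false) := by
      simp only [PySem.List.sorted2, List.foldl_append, List.foldl_cons, List.foldl_nil]
      rfl
    rw [hsnoc, ← ih, pv_blocks_snoc, pv_flatten_insB x _ (pv_inv_blocks l)]
theorem pv_dict_keys (items : List (List (String × String))) :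
    (items.foldl (fun d item => d.modify (pvNsOf item) [] (fun g => g ++ [item]))
        (PySem.Dict.empty : PySem.Dict String (List (List (String × String))))).keys =
      PySem.Set.ofList (items.map pvNsOf) := by
  rw [PySem.Dict.keys_foldl_modify_key]
  simp [PySem.Set.update, PySem.Set.ofList_eq_foldl]

theorem pv_dict_getD (items : List (List (String × String))) (n : String) :
    (items.foldl (fun d item => d.modify (pvNsOf item) [] (fun g => g ++ [item]))
        (PySem.Dict.empty : PySem.Dict String (List (List (String × String))))).getD n [] =
      items.filter (fun it => pvNsOf it == n) := by
  have hmap : items.foldl (fun d item => d.modify (pvNsOf item) [] (fun g => g ++ [item]))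
        (PySem.Dict.empty : PySem.Dict String (List (List (String × String)))) =
      (items.map (fun it => (pvNsOf it, it))).foldl
        (fun d p => d.modify p.1 [] (fun g => g ++ [p.2])) PySem.Dict.empty := by
    rw [List.foldl_map]
  rw [hmap, PySem.Dict.getD_foldl_modify_append]
  simp [List.filter_map, List.map_map, Function.comp_def]

theorem pv_A_eq (items : List (List (String × String))) (bs : Int) :
    batch_by_namespace items bs =
      (((pvBlocks items).map Prod.snd).map (fun g => pvChunks g bs)).flatten := by
  simp only [batch_by_namespace]
  rw [pv_dict_keys]
  have hstep : ∀ (batches : List (List (List (String × String)))) (n : String),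
      (PySem.List.pyRange 0
          ((PySem.List.sorted ((items.foldl (fun d item => d.modify (pvNsOf item) [] (fun g => g ++ [item])) PySem.Dict.empty).getD n []) pvKeyOf false).length : Int) bs).foldl
        (fun bt i => bt ++ [PySem.List.slice (PySem.List.sorted ((items.foldl (fun d item => d.modify (pvNsOf item) [] (fun g => g ++ [item])) PySem.Dict.empty).getD n []) pvKeyOf false) (some i) (some (i + bs))]) batches
      = batches ++ pvChunks (pvBget (pvBlocks items) n) bs := by
    intro batches n
    rw [PySem.List.foldl_append_singleton_eq_map, pv_dict_getD, ← pv_bget_blocks]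
    rfl
  simp only [hstep]
  rw [PySem.List.foldl_append_eq_flatMap]
  rw [← pv_fsts_blocks]
  simp only [List.flatMap_def, List.map_map, Function.comp_def, List.nil_append]
  congr 1
  exact List.map_congr_left (fun p hp => by
    rw [pv_bget_self _ p (pv_inv_blocks items).1 hp])

theorem pv_B_eq (items : List (List (String × String))) (bs : Int) :
    batch_by_namespace_alt items bs =
      (((pvBlocks items).map Prod.snd).map (fun g => pvChunks g bs)).flatten := by
  simp only [batch_by_namespace_alt]
  rw [← pv_flatten_blocks, pv_groupRuns_flatten _ (pv_inv_blocks items),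
    PySem.List.foldl_append_eq_flatMap]
  simp [List.flatMap_def]

-- ===== VERDICT (by name: the statement is the Claim_ definition above) =====
theorem batch_by_namespace_spec : Claim_equal_batch_by_namespace := by
  intro items batch_size _ _
  unfold Spec_batch_by_namespace
  rw [pv_A_eq, pv_B_eq]
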